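-- pv_equiv track=rewrite | github.com/Torfab/adventOfCodeAndOtherEvents | everybodycodes/TSDD/q11.py | flyFlock3
-- ===== SOURCE A (Python) =====
-- def flyFlock3(flock):
--
--   AIM=sum(flock)//len(flock)
--   flockToReduce=list(filter(lambda x: x>AIM, flock))
--   flockToReduce.insert(0, AIM)
--
--   diffArr=[flockToReduce[idx+1]-flockToReduce[idx] for idx in range(len(flockToReduce)-1)]
--   diffArr.reverse()
--
--   result=0
--   iteration=1
--   for element in diffArr:
--     result=result+element*iteration
--     iteration=iteration+1
--   return result
-- ===== SOURCE B (Python) =====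
-- def flyFlock3(flock):
--   aim = sum(flock) // len(flock)
--   result = 0
--   for x in flock:
--     if x > aim:
--       result += x - aim
--   return result
-- ===== Notes on version B (the rewrite author's own statement) =====
-- stated objective: simpler
-- what changed: Replaces the diff-array/reverse/weighted-sum machinery with a single pass accumulating x - AIM for each above-average element, because the weighted sum of reversed consecutive differences telescopes to the total excess over AIM.
import Mathlib
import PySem

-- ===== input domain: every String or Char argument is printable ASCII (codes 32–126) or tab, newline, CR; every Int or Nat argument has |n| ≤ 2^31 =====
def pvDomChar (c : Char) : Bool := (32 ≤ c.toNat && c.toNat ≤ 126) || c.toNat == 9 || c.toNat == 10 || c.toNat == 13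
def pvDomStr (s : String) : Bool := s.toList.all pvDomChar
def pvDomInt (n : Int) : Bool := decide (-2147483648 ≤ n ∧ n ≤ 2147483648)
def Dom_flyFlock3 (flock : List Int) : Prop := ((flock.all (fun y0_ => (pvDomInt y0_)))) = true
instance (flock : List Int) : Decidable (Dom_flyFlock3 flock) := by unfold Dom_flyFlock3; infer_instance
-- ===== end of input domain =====

-- B replaces A's diff-array/reverse/weighted-sum machinery with a single accumulating pass
-- (the weighted sum of reversed consecutive differences telescopes to the total excess over AIM).

-- ===== PORT A =====
def flyFlock3 (flock : List Int) : Int :=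
  let AIM := PySem.Int.floordiv flock.sum (flock.length : Int)
  let flockToReduce := AIM :: flock.filter (fun x => AIM < x)
  let diffArr := ((PySem.List.pyRange 0 ((flockToReduce.length : Int) - 1) 1).map
      (fun idx => PySem.List.pyGetD flockToReduce (idx + 1) 0 - PySem.List.pyGetD flockToReduce idx 0)).reverse
  (diffArr.foldl (fun (st : Int × Int) element => (st.1 + element * st.2, st.2 + 1)) (0, 1)).1

-- ===== PORT B =====
def flyFlock3_alt (flock : List Int) : Int :=
  let aim := PySem.Int.floordiv flock.sum (flock.length : Int)
  flock.foldl (fun result x => if aim < x then result + (x - aim) else result) 0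

-- ===== PRECONDITION & SPEC =====
-- Pre_ excludes only the empty list, on which A raises ZeroDivisionError (len(flock) == 0).
def Pre_flyFlock3 (flock : List Int) : Prop := flock ≠ []
instance (flock : List Int) : Decidable (Pre_flyFlock3 flock) := by unfold Pre_flyFlock3; infer_instance
def pvWitness_flyFlock3 : List Int := [1, 2, 3]

def Spec_flyFlock3 (flock : List Int) (out : Int) : Prop := out = flyFlock3_alt flock
instance (flock : List Int) (out : Int) : Decidable (Spec_flyFlock3 flock out) := by unfold Spec_flyFlock3; infer_instance

-- ===== CLAIM (what is proved, stated in full; the proofs are below) =====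
def Claim_equal_flyFlock3 : Prop := ∀ (flock : List Int), Dom_flyFlock3 flock → Pre_flyFlock3 flock → Spec_flyFlock3 flock (flyFlock3 flock)

-- ===== LEMMAS AND PROOFS =====

-- the consecutive-difference comprehension of A, over a general list, in Nat-range form
def pvDiffN (g : List Int) : List Int :=
  (List.range (g.length - 1)).map (fun i => g.getD (i + 1) 0 - g.getD i 0)

-- A's comprehension equals the Nat-range form
theorem pvDiffA_eq (g : List Int) :
    ((PySem.List.pyRange 0 ((g.length : Int) - 1) 1).map
      (fun idx => PySem.List.pyGetD g (idx + 1) 0 - PySem.List.pyGetD g idx 0)) = pvDiffN g := by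
  rw [PySem.List.pyRange_one, List.map_map]
  unfold pvDiffN
  have hlen : (((g.length : Int) - 1 - 0)).toNat = g.length - 1 := by omega
  rw [hlen]
  apply List.map_congr_left
  intro k hk
  simp only [Function.comp, zero_add]
  have h1 : ((k : Int) + 1) = ((k + 1 : Nat) : Int) := by push_cast; ring
  rw [h1, PySem.List.pyGetD_natCast, PySem.List.pyGetD_natCast]

theorem pvDiffN_cons_cons (a b : Int) (t : List Int) :
    pvDiffN (a :: b :: t) = (b - a) :: pvDiffN (b :: t) := by
  unfold pvDiffN
  simp only [List.length_cons]
  have h : t.length + 1 + 1 - 1 = (t.length + 1 - 1) + 1 := by omega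
  rw [h, List.range_succ_eq_map, List.map_cons, List.map_map]
  simp [Function.comp]

-- A's weighted loop
def pvStep (st : Int × Int) (e : Int) : Int × Int := (st.1 + e * st.2, st.2 + 1)

theorem pvStep_snd (d : List Int) : ∀ r i : Int, (d.foldl pvStep (r, i)).2 = i + d.length := by
  induction d with
  | nil => intro r i; simp
  | cons x t ih => intro r i; simp only [List.foldl_cons, pvStep, List.length_cons]
                   rw [ih]; push_cast; ring

theorem pvW_cons (x : Int) (d : List Int) :
    ((x :: d).reverse.foldl pvStep (0, 1)).1
      = (d.reverse.foldl pvStep (0, 1)).1 + x * (1 + d.length) := by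
  rw [List.reverse_cons, List.foldl_append]
  simp only [List.foldl_cons, List.foldl_nil, pvStep]
  rw [pvStep_snd]
  simp

-- telescoping: A's weighted reversed-diff sum over AIM :: l equals the total excess of l over a
theorem pvTelescope (l : List Int) : ∀ a : Int,
    ((pvDiffN (a :: l)).reverse.foldl pvStep (0, 1)).1 = l.sum - l.length * a := by
  induction l with
  | nil => intro a; simp [pvDiffN]
  | cons b t ih =>
    intro a
    rw [pvDiffN_cons_cons, pvW_cons, ih b]
    have hlen : (pvDiffN (b :: t)).length = t.length := by
      unfold pvDiffN; simp
    rw [hlen]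
    simp only [List.sum_cons, List.length_cons]
    push_cast
    ring

-- B's conditional pass equals the excess-sum over the filtered list
theorem pvB_fold (a : Int) (l : List Int) : ∀ r : Int,
    l.foldl (fun result x => if a < x then result + (x - a) else result) r
      = r + (l.filter (fun x => a < x)).sum - (l.filter (fun x => a < x)).length * a := by
  induction l with
  | nil => intro r; simp
  | cons x t ih =>
    intro r
    simp only [List.foldl_cons, List.filter_cons]
    by_cases h : a < x
    · simp only [h, if_pos, decide_true]
      rw [ih]
      simp only [List.sum_cons, List.length_cons]
      push_cast
      ring
    · rw [if_neg h, ih]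
      simp [h]

-- ===== VERDICT (by name: the statement is the Claim_ definition above) =====
theorem flyFlock3_spec : Claim_equal_flyFlock3 := by
  intro flock _ _
  unfold Spec_flyFlock3 flyFlock3 flyFlock3_alt
  simp only
  rw [pvDiffA_eq]
  rw [show (fun (st : Int × Int) element => (st.1 + element * st.2, st.2 + 1)) = pvStep from rfl]
  rw [pvTelescope, pvB_fold]
  ring
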